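-- pv_equiv track=rewrite | github.com/mlittl/100-Days | day3/five.py | calculate_love
-- ===== SOURCE A (Python) =====
-- def calculate_love(name1, name2):
--         letcalc2 = 0
--         for letter in name1:
--                 if letter == "l" or letter == "L":
--                     letcalc2 += 1
--                 elif letter == "o" or letter == "O":
--                     letcalc2 += 1
--                 elif letter == "v" or letter == "V":
--                     letcalc2 += 1
--                 elif letter == "e" or letter == "E":
--                     letcalc2 += 1
--
--         for letter in name2:
--                 if letter == "l" or letter == "L":
--                     letcalc2 += 1
--                 elif letter == "o" or letter == "O":
--                     letcalc2 += 1
--                 elif letter == "v" or letter == "V":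
--                     letcalc2 += 1
--                 elif letter == "e" or letter == "E":
--                     letcalc2 += 1
--         return letcalc2
-- ===== SOURCE B (Python) =====
-- def calculate_love(name1, name2):
--     freq = {}
--     for ch in name1:
--         freq[ch] = freq.get(ch, 0) + 1
--     for ch in name2:
--         freq[ch] = freq.get(ch, 0) + 1
--     return sum(freq.get(c, 0) for c in "lLoOvVeE")
-- ===== Notes on version B (the rewrite author's own statement) =====
-- stated objective: alternative
-- what changed: B builds a character-frequency dictionary of both names in one histogram pass and then sums the frequencies of the eight target letters, instead of A's per-character if/elif chains.
import Mathlib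
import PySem

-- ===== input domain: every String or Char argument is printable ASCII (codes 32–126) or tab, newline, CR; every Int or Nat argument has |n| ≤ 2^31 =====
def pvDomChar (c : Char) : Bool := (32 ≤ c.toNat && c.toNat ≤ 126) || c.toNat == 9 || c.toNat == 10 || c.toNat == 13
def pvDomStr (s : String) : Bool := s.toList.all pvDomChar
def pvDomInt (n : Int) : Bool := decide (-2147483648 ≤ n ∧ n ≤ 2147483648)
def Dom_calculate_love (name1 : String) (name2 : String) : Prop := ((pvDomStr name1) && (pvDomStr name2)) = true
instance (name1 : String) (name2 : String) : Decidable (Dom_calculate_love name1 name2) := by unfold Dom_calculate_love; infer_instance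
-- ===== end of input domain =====

-- B replaces A's per-character if/elif counting chains by a frequency dictionary of both
-- names followed by summing the counts of the eight target letters (alternative decomposition).


-- ===== PORT A =====
def pvStepA (acc : Int) (letter : Char) : Int :=
  if letter == 'l' || letter == 'L' then acc + 1
  else if letter == 'o' || letter == 'O' then acc + 1
  else if letter == 'v' || letter == 'V' then acc + 1
  else if letter == 'e' || letter == 'E' then acc + 1
  else acc

def calculate_love (name1 : String) (name2 : String) : Int :=
  let letcalc1 := name1.toList.foldl pvStepA 0
  name2.toList.foldl pvStepA letcalc1

-- ===== PORT B =====
def pvHist (d : PySem.Dict Char Int) (l : List Char) : PySem.Dict Char Int :=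
  l.foldl (fun d ch => d.insert ch (d.getD ch 0 + 1)) d

def calculate_love_alt (name1 : String) (name2 : String) : Int :=
  let freq := pvHist PySem.Dict.empty name1.toList
  let freq := pvHist freq name2.toList
  (("lLoOvVeE".toList).map (fun c => freq.getD c 0)).sum

-- ===== PRECONDITION & SPEC =====
def Spec_calculate_love (name1 : String) (name2 : String) (out : Int) : Prop := out = calculate_love_alt name1 name2
instance (name1 : String) (name2 : String) (out : Int) : Decidable (Spec_calculate_love name1 name2 out) := by unfold Spec_calculate_love; infer_instance

-- ===== CLAIM (what is proved, stated in full; the proofs are below) =====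
def Claim_equal_calculate_love : Prop := ∀ (name1 : String) (name2 : String), Dom_calculate_love name1 name2 → Spec_calculate_love name1 name2 (calculate_love name1 name2)

-- ===== LEMMAS AND PROOFS =====
theorem pvFoldA_eq (l : List Char) (acc : Int) :
    l.foldl pvStepA acc =
      acc + (l.count 'l' : Int) + l.count 'L' + l.count 'o' + l.count 'O'
          + l.count 'v' + l.count 'V' + l.count 'e' + l.count 'E' := by
  induction l generalizing acc with
  | nil => simp
  | cons a t ih =>
    simp only [List.foldl_cons, ih, List.count_cons]
    by_cases h1 : a = 'l'; · subst h1; simp [pvStepA]; ring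
    by_cases h2 : a = 'L'; · subst h2; simp [pvStepA]; ring
    by_cases h3 : a = 'o'; · subst h3; simp [pvStepA]; ring
    by_cases h4 : a = 'O'; · subst h4; simp [pvStepA]; ring
    by_cases h5 : a = 'v'; · subst h5; simp [pvStepA]; ring
    by_cases h6 : a = 'V'; · subst h6; simp [pvStepA]; ring
    by_cases h7 : a = 'e'; · subst h7; simp [pvStepA]; ring
    by_cases h8 : a = 'E'; · subst h8; simp [pvStepA]; ring
    simp [pvStepA, h1, h2, h3, h4, h5, h6, h7, h8]

theorem pvHist_getD (d : PySem.Dict Char Int) (l : List Char) (c : Char) :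
    (pvHist d l).getD c 0 = d.getD c 0 + l.count c := by
  simp [pvHist, PySem.Dict.getD_foldl_insert_add_one]

-- ===== VERDICT (by name: the statement is the Claim_ definition above) =====
theorem calculate_love_spec : Claim_equal_calculate_love := by
  intro name1 name2 _
  unfold Spec_calculate_love calculate_love calculate_love_alt
  have h : ("lLoOvVeE".toList) = ['l','L','o','O','v','V','e','E'] := by rfl
  simp only [pvFoldA_eq, pvHist_getD, PySem.Dict.getD_empty, h, List.map, List.sum_cons,
    List.sum_nil]
  ring
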